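-- pv_equiv track=rewrite | github.com/9jobsapplicationservice-dot/all-temporal-ui-server-automation | linkdin_automation/modules/helpers.py | _pick_confirm_fallback
-- ===== SOURCE A (Python) =====
-- def _pick_confirm_fallback(buttons: list[str]) -> str:
--     priorities = (
--         "continue",
--         "look's good",
--         "looks good",
--         "disable pause",
--         "skip confirmation",
--         "no",
--         "ok",
--         "okay",
--         "yes",
--     )
--     lowered_buttons = [(button.lower(), button) for button in buttons]
--     for priority in priorities:
--         for lowered, original in lowered_buttons:
--             if priority in lowered:
--                 return original
--     return buttons[-1] if buttons else "OK"
-- ===== SOURCE B (Python) =====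
-- def _pick_confirm_fallback(buttons: list[str]) -> str:
--     priorities = (
--         "continue",
--         "look's good",
--         "looks good",
--         "disable pause",
--         "skip confirmation",
--         "no",
--         "ok",
--         "okay",
--         "yes",
--     )
--     best = None
--     best_rank = len(priorities)
--     for button in buttons:
--         low = button.lower()
--         rank = next((i for i, p in enumerate(priorities) if p in low), None)
--         if rank is not None and rank < best_rank:
--             best_rank = rank
--             best = button
--     if best is not None:
--         return best
--     return buttons[-1] if buttons else "OK"
-- ===== Notes on version B (the rewrite author's own statement) =====
-- stated objective: alternative
-- what changed: Replaced A's priority-major nested scan (for each priority, rescan all buttons) by a single button-major pass that computes each button's priority rank and keeps the running strict minimum (strict < preserves A's earliest-button tie-break).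
import Mathlib
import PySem

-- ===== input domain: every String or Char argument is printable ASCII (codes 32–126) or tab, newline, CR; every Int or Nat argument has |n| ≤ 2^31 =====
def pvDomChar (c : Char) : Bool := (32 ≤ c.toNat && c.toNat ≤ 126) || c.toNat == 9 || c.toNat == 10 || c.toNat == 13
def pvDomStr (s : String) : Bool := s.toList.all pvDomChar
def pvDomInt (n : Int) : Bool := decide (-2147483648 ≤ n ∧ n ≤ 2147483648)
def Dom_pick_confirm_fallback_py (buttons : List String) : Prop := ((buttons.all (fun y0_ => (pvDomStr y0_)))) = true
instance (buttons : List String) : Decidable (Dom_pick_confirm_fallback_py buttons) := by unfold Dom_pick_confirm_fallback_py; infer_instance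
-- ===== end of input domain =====

-- B replaces A's priority-major nested scan by one button-major pass keeping the running minimal priority rank (alternative decomposition, same cost).

-- ===== PORT A =====
def pvPriorities : List String :=
  ["continue", "look's good", "looks good", "disable pause", "skip confirmation",
   "no", "ok", "okay", "yes"]

-- inner 'for lowered, original in lowered_buttons: if priority in lowered: return original'
def pvFindA : List (String × String) → String → Option String
  | [], _ => none
  | (l, o) :: t, p => if PySem.Str.isIn p l then some o else pvFindA t p

-- outer 'for priority in priorities: …'
def pvLoopA : List String → List (String × String) → Option String
  | [], _ => none
  | p :: t, lowered =>
      match pvFindA lowered p with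
      | some o => some o
      | none => pvLoopA t lowered

def pick_confirm_fallback_py (buttons : List String) : String :=
  let lowered := buttons.map (fun b => (PySem.Str.lower b, b))
  match pvLoopA pvPriorities lowered with
  | some o => o
  | none => match buttons.getLast? with
            | some b => b
            | none => "OK"

-- ===== PORT B =====
-- 'next((i for i, p in enumerate(priorities) if p in low), None)'
def pvRankB : List String → Nat → String → Option Nat
  | [], _, _ => none
  | p :: t, i, low => if PySem.Str.isIn p low then some i else pvRankB t (i + 1) low

-- 'for button in buttons: …' maintaining (best, best_rank)
def pvBestLoop : List String → Option String → Nat → Option String × Nat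
  | [], best, bestRank => (best, bestRank)
  | b :: t, best, bestRank =>
      match pvRankB pvPriorities 0 (PySem.Str.lower b) with
      | some r => if r < bestRank then pvBestLoop t (some b) r else pvBestLoop t best bestRank
      | none => pvBestLoop t best bestRank

def pick_confirm_fallback_py_alt (buttons : List String) : String :=
  match (pvBestLoop buttons none pvPriorities.length).1 with
  | some b => b
  | none => match buttons.getLast? with
            | some b => b
            | none => "OK"

-- ===== PRECONDITION & SPEC =====
def Spec_pick_confirm_fallback_py (buttons : List String) (out : String) : Prop := out = pick_confirm_fallback_py_alt buttons
instance (buttons : List String) (out : String) : Decidable (Spec_pick_confirm_fallback_py buttons out) := by unfold Spec_pick_confirm_fallback_py; infer_instance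

-- ===== CLAIM (what is proved, stated in full; the proofs are below) =====
def Claim_equal_pick_confirm_fallback_py : Prop := ∀ (buttons : List String), Dom_pick_confirm_fallback_py buttons → Spec_pick_confirm_fallback_py buttons (pick_confirm_fallback_py buttons)

-- ===== LEMMAS AND PROOFS =====

-- merge step for the argmin: smaller rank wins, the earlier (left) button wins ties
def pvMerge : Option Nat → String → Option (Nat × String) → Option (Nat × String)
  | none, _, u => u
  | some r, o, none => some (r, o)
  | some r, o, some (r', o') => if r ≤ r' then some (r, o) else some (r', o')

-- common abstraction: the (rank, button) pair of minimal rank, earliest button on ties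
def pvBest (ps : List String) : List (String × String) → Option (Nat × String)
  | [] => none
  | (l, o) :: t => pvMerge (pvRankB ps 0 l) o (pvBest ps t)

theorem pvRankB_shift (ps : List String) (i : Nat) (low : String) :
    pvRankB ps i low = (pvRankB ps 0 low).map (fun r => r + i) := by
  induction ps generalizing i with
  | nil => simp [pvRankB]
  | cons p t ih =>
      simp only [pvRankB]
      by_cases h : PySem.Str.isIn p low = true
      · rw [if_pos h, if_pos h]; simp
      · rw [if_neg h, if_neg h, ih (i + 1), ih (0 + 1)]
        cases pvRankB t 0 low <;> simp <;> omega

theorem pvRankB_lt (ps : List String) (i : Nat) (low : String) (r : Nat)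
    (h : pvRankB ps i low = some r) : r < i + ps.length := by
  induction ps generalizing i with
  | nil => simp [pvRankB] at h
  | cons p t ih =>
      simp only [pvRankB] at h
      by_cases hp : PySem.Str.isIn p low = true
      · rw [if_pos hp] at h
        injection h with h
        simp only [List.length_cons]
        omega
      · rw [if_neg hp] at h
        have := ih (i + 1) h
        simp only [List.length_cons]
        omega

theorem pvBest_nil (lowered : List (String × String)) : pvBest [] lowered = none := by
  induction lowered with
  | nil => rfl
  | cons x t ih => obtain ⟨l, o⟩ := x; simp [pvBest, pvRankB, pvMerge, ih]

theorem pvBest_lt (ps : List String) (lowered : List (String × String)) (r : Nat) (b : String)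
    (h : pvBest ps lowered = some (r, b)) : r < ps.length := by
  induction lowered generalizing r b with
  | nil => simp [pvBest] at h
  | cons x t ih =>
      obtain ⟨l, o⟩ := x
      simp only [pvBest] at h
      cases hr : pvRankB ps 0 l with
      | none => rw [hr] at h; simp only [pvMerge] at h; exact ih r b h
      | some s =>
          have hs : s < ps.length := by have := pvRankB_lt ps 0 l s hr; omega
          rw [hr] at h
          cases hb : pvBest ps t with
          | none => rw [hb] at h; simp only [pvMerge, Option.some.injEq, Prod.mk.injEq] at h; omega
          | some u =>
              obtain ⟨r', o'⟩ := u
              rw [hb] at h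
              simp only [pvMerge] at h
              by_cases hle : s ≤ r'
              · rw [if_pos hle] at h
                simp only [Option.some.injEq, Prod.mk.injEq] at h
                omega
              · rw [if_neg hle] at h
                simp only [Option.some.injEq, Prod.mk.injEq] at h
                exact h.1 ▸ ih r' o' hb

-- if some button matches p, A's inner scan finds the first one, and it is the unique rank-0 minimum
theorem pvFindA_some (p : String) (t : List String) (lowered : List (String × String)) (o : String)
    (h : pvFindA lowered p = some o) : pvBest (p :: t) lowered = some (0, o) := by
  induction lowered with
  | nil => simp [pvFindA] at h
  | cons x tl ih =>
      obtain ⟨l, o'⟩ := x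
      simp only [pvFindA] at h
      by_cases hp : PySem.Str.isIn p l = true
      · rw [if_pos hp] at h
        injection h with h
        subst h
        simp only [pvBest, pvRankB, if_pos hp]
        cases pvBest (p :: t) tl with
        | none => rfl
        | some u => obtain ⟨r', _⟩ := u; simp [pvMerge]
      · rw [if_neg hp] at h
        have hb := ih h
        simp only [pvBest, pvRankB, if_neg hp, hb]
        rw [pvRankB_shift t 1 l]
        cases pvRankB t 0 l with
        | none => rfl
        | some a => simp only [Option.map_some, pvMerge]; rw [if_neg (by omega)]

-- if no button matches p, dropping p shifts every rank down by one and keeps the argmin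
theorem pvFindA_none (p : String) (t : List String) (lowered : List (String × String))
    (h : pvFindA lowered p = none) :
    pvBest (p :: t) lowered = (pvBest t lowered).map (fun u => (u.1 + 1, u.2)) := by
  induction lowered with
  | nil => simp [pvBest]
  | cons x tl ih =>
      obtain ⟨l, o⟩ := x
      simp only [pvFindA] at h
      by_cases hp : PySem.Str.isIn p l = true
      · rw [if_pos hp] at h; exact absurd h (by simp)
      · rw [if_neg hp] at h
        have hb := ih h
        simp only [pvBest, pvRankB, if_neg hp, hb, pvRankB_shift t 1 l]
        cases pvRankB t 0 l with
        | none =>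
            cases pvBest t tl with
            | none => rfl
            | some u => obtain ⟨r', o'⟩ := u; rfl
        | some s =>
            cases pvBest t tl with
            | none => rfl
            | some u =>
                obtain ⟨r', o'⟩ := u
                simp only [Option.map_some, pvMerge]
                by_cases hle : s ≤ r'
                · rw [if_pos (by omega : s + 1 ≤ r' + 1), if_pos hle]; rfl
                · rw [if_neg (by omega : ¬ s + 1 ≤ r' + 1), if_neg hle]; rfl

theorem pvLoopA_eq_best (ps : List String) (lowered : List (String × String)) :
    pvLoopA ps lowered = (pvBest ps lowered).map (·.2) := by
  induction ps with
  | nil => simp [pvLoopA, pvBest_nil]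
  | cons p t ih =>
      simp only [pvLoopA]
      cases h : pvFindA lowered p with
      | some o => rw [pvFindA_some p t lowered o h]; rfl
      | none =>
          rw [pvFindA_none p t lowered h, ih]
          cases pvBest t lowered with
          | none => rfl
          | some u => rfl

theorem pvBestLoop_eq (buttons : List String) (best : Option String) (bestRank : Nat) :
    (pvBestLoop buttons best bestRank).1 =
      match pvBest pvPriorities (buttons.map (fun b => (PySem.Str.lower b, b))) with
      | none => best
      | some (r', b) => if r' < bestRank then some b else best := by
  induction buttons generalizing best bestRank with
  | nil => simp [pvBestLoop, pvBest]
  | cons b t ih =>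
      simp only [pvBestLoop, List.map_cons, pvBest]
      cases hr : pvRankB pvPriorities 0 (PySem.Str.lower b) with
      | none =>
          simp only [pvMerge]
          rw [ih]
      | some s =>
          cases hb : pvBest pvPriorities (t.map (fun b => (PySem.Str.lower b, b))) with
          | none =>
              simp only [pvMerge]
              by_cases hs : s < bestRank
              · rw [if_pos hs, if_pos hs, ih, hb]
              · rw [if_neg hs, if_neg hs, ih, hb]
          | some u =>
              obtain ⟨r', o'⟩ := u
              simp only [pvMerge]
              by_cases hs : s < bestRank
              · rw [if_pos hs, ih, hb]
                by_cases hle : s ≤ r'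
                · rw [if_pos hle]
                  simp only [if_neg (by omega : ¬ r' < s), if_pos hs]
                · rw [if_neg hle]
                  simp only [if_pos (by omega : r' < s), if_pos (by omega : r' < bestRank)]
              · rw [if_neg hs, ih, hb]
                by_cases hle : s ≤ r'
                · rw [if_pos hle]
                  simp only [if_neg (by omega : ¬ r' < bestRank), if_neg (by omega : ¬ s < bestRank)]
                · rw [if_neg hle]

-- ===== VERDICT (by name: the statement is the Claim_ definition above) =====
theorem pick_confirm_fallback_py_spec : Claim_equal_pick_confirm_fallback_py := by
  intro buttons _
  unfold Spec_pick_confirm_fallback_py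
  simp only [pick_confirm_fallback_py, pick_confirm_fallback_py_alt, pvLoopA_eq_best, pvBestLoop_eq]
  cases h : pvBest pvPriorities (buttons.map (fun b => (PySem.Str.lower b, b))) with
  | none => rfl
  | some u =>
      obtain ⟨r, b⟩ := u
      have := pvBest_lt _ _ _ _ h
      simp only [Option.map_some, if_pos this]
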